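-- pv_equiv track=rewrite | github.com/vladislav-larionov/diametr_limited_spanning_tree | diametr_limited_spanning_tree.py | find_min_edge
-- ===== SOURCE A (Python) =====
-- def find_min_edge(edges):
--     # return min(edges, key=lambda edge: edge[2])
--     mins = []
--     min_v = None
--     for edge in edges:
--         if min_v is None:
--             mins.append(edge)
--             min_v = edge[2]
--         elif edge[2] < min_v:
--             min_v = edge[2]
--             mins.clear()
--             mins.append(edge)
--         elif edge[2] == min_v:
--             mins.append(edge)
--     return mins
-- ===== SOURCE B (Python) =====
-- def find_min_edge(edges):
--     if not edges:
--         return []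
--     m = min(e[2] for e in edges)
--     return [e for e in edges if e[2] == m]
-- ===== Notes on version B (the rewrite author's own statement) =====
-- stated objective: simpler
-- what changed: Replaces A's single running-min pass with mutation (clear/append of the accumulator) by two simple passes: compute the minimum weight with min(), then filter the edges equal to it.
import Mathlib
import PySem

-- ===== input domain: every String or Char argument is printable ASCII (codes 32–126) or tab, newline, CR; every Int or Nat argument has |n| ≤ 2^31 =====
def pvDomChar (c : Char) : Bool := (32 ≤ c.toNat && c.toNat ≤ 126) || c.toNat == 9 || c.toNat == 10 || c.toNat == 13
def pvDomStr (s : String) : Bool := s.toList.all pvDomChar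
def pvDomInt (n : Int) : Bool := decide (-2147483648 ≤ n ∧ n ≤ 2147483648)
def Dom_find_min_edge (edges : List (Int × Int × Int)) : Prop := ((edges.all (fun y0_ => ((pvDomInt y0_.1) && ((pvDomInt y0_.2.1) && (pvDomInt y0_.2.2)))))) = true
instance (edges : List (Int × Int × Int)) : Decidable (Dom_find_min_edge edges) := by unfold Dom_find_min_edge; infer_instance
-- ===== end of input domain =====

-- B computes the minimum weight first and then filters, instead of A's running-min pass that clears and re-fills the accumulator; objective: simpler.

-- ===== PORT A =====
-- one iteration of A's loop body: state = (mins, min_v)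
def pvStepA (s : List (Int × Int × Int) × Option Int) (edge : Int × Int × Int) :
    List (Int × Int × Int) × Option Int :=
  match s.2 with
  | none => (s.1 ++ [edge], some edge.2.2)
  | some m =>
    if edge.2.2 < m then ([edge], some edge.2.2)
    else if edge.2.2 = m then (s.1 ++ [edge], some m)
    else s

def find_min_edge (edges : List (Int × Int × Int)) : List (Int × Int × Int) :=
  (edges.foldl pvStepA ([], none)).1

-- ===== PORT B =====
def find_min_edge_alt (edges : List (Int × Int × Int)) : List (Int × Int × Int) :=
  match edges with
  | [] => []
  | e :: rest =>
    let m := rest.foldl (fun a f => min a f.2.2) e.2.2   -- min(e[2] for e in edges)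
    (e :: rest).filter (fun f => f.2.2 == m)

-- ===== PRECONDITION & SPEC =====
def Spec_find_min_edge (edges : List (Int × Int × Int)) (out : List (Int × Int × Int)) : Prop := out = find_min_edge_alt edges
instance (edges : List (Int × Int × Int)) (out : List (Int × Int × Int)) : Decidable (Spec_find_min_edge edges out) := by unfold Spec_find_min_edge; infer_instance

-- ===== CLAIM (what is proved, stated in full; the proofs are below) =====
def Claim_equal_find_min_edge : Prop := ∀ (edges : List (Int × Int × Int)), Dom_find_min_edge edges → Spec_find_min_edge edges (find_min_edge edges)

-- ===== LEMMAS AND PROOFS =====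

theorem pvFoldMin_le (rest : List (Int × Int × Int)) (a : Int) :
    rest.foldl (fun a f => min a f.2.2) a ≤ a := by
  induction rest generalizing a with
  | nil => simp
  | cons f rest ih => exact le_trans (ih (min a f.2.2)) (min_le_left _ _)

-- loop invariant: from state (acc, some m), A's fold returns the filter at the new minimum
-- (prefixed by acc if the minimum did not drop).
theorem pvLoopA (rest : List (Int × Int × Int)) (acc : List (Int × Int × Int)) (m : Int) :
    rest.foldl pvStepA (acc, some m) =
      (let m' := rest.foldl (fun a f => min a f.2.2) m
       ((if m' < m then rest.filter (fun f => f.2.2 == m')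
         else acc ++ rest.filter (fun f => f.2.2 == m)), some m')) := by
  induction rest generalizing acc m with
  | nil => simp
  | cons f rest ih =>
    simp only [List.foldl_cons, pvStepA]
    by_cases h1 : f.2.2 < m
    · simp only [if_pos h1, ih]
      have hle := pvFoldMin_le rest f.2.2
      have hmin : min m f.2.2 = f.2.2 := min_eq_right (le_of_lt h1)
      by_cases h2 : rest.foldl (fun a f => min a f.2.2) f.2.2 < f.2.2
      · simp only [hmin]
        rw [if_pos h2, if_pos (lt_trans h2 h1), List.filter_cons]
        have : (f.2.2 == rest.foldl (fun a f => min a f.2.2) f.2.2) = false := by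
          simp; omega
        simp [this]
      · have heq : rest.foldl (fun a f => min a f.2.2) f.2.2 = f.2.2 := le_antisymm hle (not_lt.mp h2)
        simp only [hmin, heq]
        rw [if_neg (lt_irrefl _), if_pos h1, List.filter_cons]
        simp
    · by_cases h2 : f.2.2 = m
      · subst h2
        rw [if_neg h1, if_pos rfl, ih]
        simp only [min_self]
        by_cases h3 : rest.foldl (fun a f => min a f.2.2) f.2.2 < f.2.2
        · rw [if_pos h3, if_pos h3, List.filter_cons]
          have : (f.2.2 == rest.foldl (fun a f => min a f.2.2) f.2.2) = false := by
            simp; omega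
          simp [this]
        · rw [if_neg h3, if_neg h3, List.filter_cons]
          simp
      · simp only [if_neg h1, if_neg h2, ih]
        have hmin : min m f.2.2 = m := min_eq_left (by omega)
        simp only [hmin]
        by_cases h3 : rest.foldl (fun a f => min a f.2.2) m < m
        · rw [if_pos h3, if_pos h3, List.filter_cons]
          have : (f.2.2 == rest.foldl (fun a f => min a f.2.2) m) = false := by
            simp; omega
          simp [this]
        · rw [if_neg h3, if_neg h3, List.filter_cons]
          have : (f.2.2 == m) = false := by simp; omega
          simp [this]

-- ===== VERDICT (by name: the statement is the Claim_ definition above) =====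
theorem find_min_edge_spec : Claim_equal_find_min_edge := by
  intro edges _
  unfold Spec_find_min_edge find_min_edge find_min_edge_alt
  match edges with
  | [] => rfl
  | e :: rest =>
    simp only [List.foldl_cons]
    have h0 : pvStepA ([], none) e = ([e], some e.2.2) := rfl
    rw [h0, pvLoopA]
    have hle := pvFoldMin_le rest e.2.2
    by_cases h : rest.foldl (fun a f => min a f.2.2) e.2.2 < e.2.2
    · simp only [if_pos h, List.filter_cons]
      have : (e.2.2 == rest.foldl (fun a f => min a f.2.2) e.2.2) = false := by
        simp; omega
      simp [this]
    · have heq : rest.foldl (fun a f => min a f.2.2) e.2.2 = e.2.2 := le_antisymm hle (not_lt.mp h)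
      simp only [heq, List.filter_cons]
      simp
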